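-- pv_equiv track=rewrite | github.com/JoaquinGimenez-112733/colgadero | generar_posibilidades.py | generar_particiones
-- ===== SOURCE A (Python) =====
-- def generar_particiones(string):
--     resultados = []
--
--     def generar_particiones_rec(particion_actual, indice):
--         if indice == len(string):
--             resultados.append(particion_actual[:])
--             return
--
--         for longitud in range(1, len(string) - indice + 1):
--             particion_actual.append(string[indice : indice + longitud])
--             generar_particiones_rec(particion_actual, indice + longitud)
--             particion_actual.pop()
--
--     generar_particiones_rec([], 0)
--
--     return resultados
-- ===== SOURCE B (Python) =====
-- def generar_particiones(string):
--     n = len(string)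
--     tabla = [None] * (n + 1)
--     tabla[n] = [[]]
--     for i in range(n - 1, -1, -1):
--         tabla[i] = [[string[i:j]] + resto
--                     for j in range(i + 1, n + 1)
--                     for resto in tabla[j]]
--     return tabla[0]
-- ===== Notes on version B (the rewrite author's own statement) =====
-- stated objective: alternative
-- what changed: A's backtracking recursion with a shared accumulator list (append/recurse/pop) is replaced by a bottom-up dynamic-programming table tabla[i] = all partitions of the suffix starting at i, filled from i = n down to 0 and read off at tabla[0].
import Mathlib
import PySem

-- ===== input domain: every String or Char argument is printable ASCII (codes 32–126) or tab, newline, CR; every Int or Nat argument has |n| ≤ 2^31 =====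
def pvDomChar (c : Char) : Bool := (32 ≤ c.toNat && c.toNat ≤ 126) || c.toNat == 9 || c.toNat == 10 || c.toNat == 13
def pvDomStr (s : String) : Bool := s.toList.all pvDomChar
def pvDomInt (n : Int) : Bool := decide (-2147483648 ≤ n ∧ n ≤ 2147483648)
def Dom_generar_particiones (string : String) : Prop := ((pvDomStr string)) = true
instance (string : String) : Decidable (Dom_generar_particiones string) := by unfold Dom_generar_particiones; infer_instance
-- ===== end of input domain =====

-- B replaces A's backtracking recursion (shared accumulator + append/pop) by a bottom-up
-- dynamic-programming table over suffixes; objective: alternative.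

-- ===== PORT A =====
-- the nested recursive helper: `res` threads the shared `resultados`, `cur` is `particion_actual`
def genRecA (s : List Char) (cur : List String) (i : Nat) (res : List (List String)) :
    List (List String) :=
  if _h : i = s.length then res ++ [cur]
  else
    -- for longitud in range(1, len(string) - indice + 1): recurse, threading `resultados`
    (List.range' 1 (s.length - i)).attach.foldl
      (fun r l =>
        genRecA s
          (cur ++ [String.ofList (PySem.List.slice s (some (i : Int)) (some ((i : Int) + (l.1 : Int))))])
          (i + l.1) r)
      res
termination_by s.length - i
decreasing_by
  have hm := List.mem_range'_1.mp l.2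
  omega

def generar_particiones (string : String) : List (List String) :=
  genRecA string.toList [] 0 []

-- ===== PORT B =====
-- one row of the table: tabla[i] built from the rows below it; `rows` holds
-- [tabla[i+1], …, tabla[n]], so tabla[j] = rows[j - (i+1)]
def rowB (s : List Char) (i n : Nat) (rows : List (List (List String))) : List (List String) :=
  (List.range' (i + 1) (n - i)).flatMap (fun j =>
    (rows.getD (j - (i + 1)) []).map (fun resto =>
      String.ofList (PySem.List.slice s (some (i : Int)) (some (j : Int))) :: resto))

-- the table after the loop has processed i = n-1 … n-m (rows kept back-to-front)
def tableB (s : List Char) (n : Nat) : Nat → List (List (List String))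
  | 0 => [[[]]]
  | m + 1 => rowB s (n - (m + 1)) n (tableB s n m) :: tableB s n m

def generar_particiones_alt (string : String) : List (List String) :=
  (tableB string.toList string.toList.length string.toList.length).headD []

-- ===== PRECONDITION & SPEC =====
def Spec_generar_particiones (string : String) (out : List (List String)) : Prop := out = generar_particiones_alt string
instance (string : String) (out : List (List String)) : Decidable (Spec_generar_particiones string out) := by unfold Spec_generar_particiones; infer_instance

-- ===== CLAIM (what is proved, stated in full; the proofs are below) =====
def Claim_equal_generar_particiones : Prop := ∀ (string : String), Dom_generar_particiones string → Spec_generar_particiones string (generar_particiones string)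

-- ===== LEMMAS AND PROOFS =====

-- the mathematical value both programs compute: all contiguous partitions of a char list
def parts (l : List Char) : List (List String) :=
  match l with
  | [] => [[]]
  | c :: cs =>
      (List.range (cs.length + 1)).flatMap
        (fun k => (parts (cs.drop k)).map (fun p => String.ofList (c :: cs.take k) :: p))
termination_by l.length
decreasing_by simp

theorem parts_nil : parts [] = [[]] := by rw [parts.eq_def]

theorem parts_cons (c : Char) (cs : List Char) :
    parts (c :: cs) =
      (List.range (cs.length + 1)).flatMap
        (fun k => (parts (cs.drop k)).map (fun p => String.ofList (c :: cs.take k) :: p)) := by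
  rw [parts.eq_def]

-- unfolding `parts` on a suffix of s, with the segment written through drop/take
theorem parts_drop_expand (s : List Char) (i : Nat) (h : i < s.length) :
    parts (s.drop i) =
      (List.range (s.length - i)).flatMap
        (fun k => (parts (s.drop (i + 1 + k))).map
          (fun p => String.ofList ((s.drop i).take (k + 1)) :: p)) := by
  conv_lhs => rw [List.drop_eq_getElem_cons h, parts_cons]
  have hrange : (s.drop (i + 1)).length + 1 = s.length - i := by
    rw [List.length_drop]; omega
  rw [hrange]
  apply List.flatMap_congr
  intro k _
  have hdrop : (s.drop (i + 1)).drop k = s.drop (i + 1 + k) := by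
    rw [List.drop_drop]
  have htake : (s.drop i).take (k + 1) = s[i] :: (s.drop (i + 1)).take k := by
    rw [List.drop_eq_getElem_cons h, List.take_succ_cons]
  rw [hdrop, htake]

-- A's recursion appends, after `res`, every partition of the suffix at i prefixed by `cur`
theorem genRecA_eq (s : List Char) (cur : List String) (i : Nat) (res : List (List String))
    (h : i ≤ s.length) :
    genRecA s cur i res = res ++ (parts (s.drop i)).map (fun p => cur ++ p) := by
  rw [genRecA]
  by_cases hi : i = s.length
  · simp [hi, List.drop_length, parts_nil]
  · simp only [hi, dite_false]
    have hlt : i < s.length := by omega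
    have key : ∀ (xs : List {l // l ∈ List.range' 1 (s.length - i)}) (r : List (List String)),
        xs.foldl
          (fun r l =>
            genRecA s
              (cur ++ [String.ofList (PySem.List.slice s (some (i : Int)) (some ((i : Int) + (l.1 : Int))))])
              (i + l.1) r)
          r
        = r ++ xs.flatMap (fun l =>
            (parts (s.drop (i + l.1))).map (fun p =>
              (cur ++ [String.ofList (PySem.List.slice s (some (i : Int)) (some ((i : Int) + (l.1 : Int))))]) ++ p)) := by
      intro xs
      induction xs with
      | nil => intro r; simp
      | cons x xs ih =>
          intro r
          rw [List.foldl_cons,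
            genRecA_eq s _ (i + x.1) r (by have := List.mem_range'_1.mp x.2; omega),
            List.flatMap_cons, ih, List.append_assoc]
    rw [key, parts_drop_expand s i hlt]
    congr 1
    have h1 : (List.range' 1 (s.length - i)).attach.flatMap
        (fun x => (parts (s.drop (i + x.1))).map (fun p =>
          (cur ++ [String.ofList (PySem.List.slice s (some (i : Int)) (some ((i : Int) + (x.1 : Int))))]) ++ p))
      = (List.range' 1 (s.length - i)).flatMap
        (fun v => (parts (s.drop (i + v))).map (fun p =>
          (cur ++ [String.ofList (PySem.List.slice s (some (i : Int)) (some ((i : Int) + (v : Int))))]) ++ p)) := by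
      conv_rhs => rw [← List.attach_map_subtype_val (List.range' 1 (s.length - i))]
      rw [List.flatMap_map]
    have h2 : (List.range' 1 (s.length - i)).flatMap
        (fun v => (parts (s.drop (i + v))).map (fun p =>
          (cur ++ [String.ofList (PySem.List.slice s (some (i : Int)) (some ((i : Int) + (v : Int))))]) ++ p))
      = ((List.range (s.length - i)).flatMap
          (fun k => (parts (s.drop (i + 1 + k))).map
            (fun p => String.ofList ((s.drop i).take (k + 1)) :: p))).map (fun p => cur ++ p) := by
      rw [List.map_flatMap, List.range'_eq_map_range, List.flatMap_map]
      apply List.flatMap_congr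
      intro k _
      rw [PySem.List.slice_natCast_add, List.map_map]
      have h3 : i + (1 + k) = i + 1 + k := by omega
      have h4 : 1 + k = k + 1 := by omega
      rw [h3, h4]
      apply List.map_congr_left
      intro p _
      simp
    exact h1.trans h2
termination_by s.length - i
decreasing_by
  have := List.mem_range'_1.mp x.2
  omega

-- B's table rows are exactly the partition lists of the corresponding suffixes
theorem tableB_eq (s : List Char) (m : Nat) (h : m ≤ s.length) :
    tableB s s.length m
      = (List.range (m + 1)).map (fun k => parts (s.drop (s.length - m + k))) := by
  induction m with
  | zero => simp [tableB, List.range_one, List.drop_length, parts_nil]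
  | succ m ih =>
      rw [tableB, ih (by omega),
        show List.range (m + 1 + 1) = 0 :: (List.range (m + 1)).map Nat.succ from
          List.range_succ_eq_map,
        List.map_cons, List.map_map]
      congr 1
      · -- head: rowB computes parts of the suffix at i = s.length - (m+1)
        set i := s.length - (m + 1) with hidef
        have hlt : i < s.length := by omega
        simp only [Nat.add_zero]
        rw [parts_drop_expand s i hlt]
        simp only [rowB]
        rw [List.range'_eq_map_range, List.flatMap_map]
        have hcount : s.length - i = m + 1 := by omega
        rw [hcount]
        apply List.flatMap_congr
        intro k hk
        have hk' : k < m + 1 := List.mem_range.mp hk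
        have hsub : i + 1 + k - (i + 1) = k := by omega
        rw [hsub, PySem.List.getD_map_range _ _ _ [] hk']
        have hidx : s.length - m + k = i + 1 + k := by omega
        rw [hidx, PySem.List.slice_natCast]
        have htk : i + 1 + k - i = k + 1 := by omega
        rw [htk]
      · -- tail: reindex the remaining rows
        apply List.map_congr_left
        intro k _
        simp only [Function.comp]
        congr 2
        omega

-- ===== VERDICT (by name: the statement is the Claim_ definition above) =====
theorem generar_particiones_spec : Claim_equal_generar_particiones := by
  intro string _
  unfold Spec_generar_particiones generar_particiones generar_particiones_alt
  rw [genRecA_eq string.toList [] 0 [] (by omega),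
    tableB_eq string.toList string.toList.length (by omega),
    show List.range (string.toList.length + 1)
        = 0 :: (List.range string.toList.length).map Nat.succ from List.range_succ_eq_map]
  simp
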